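-- pv_equiv track=rewrite | github.com/Javilejoo/Lexical-Analyzer-Generator | yalex_parser.py | convertir_puntos_a_literal
-- ===== SOURCE A (Python) =====
-- def convertir_puntos_a_literal(expresion):
--     """
--     Recorre la expresión y convierte cada punto que no esté dentro de comillas
--     en "'.'" para que se trate como literal.
--     """
--     resultado = ""
--     in_quote = False
--     i = 0
--     while i < len(expresion):
--         ch = expresion[i]
--         if ch == "'":
--             # Alternar estado de literal
--             resultado += ch
--             in_quote = not in_quote
--             i += 1
--         else:
--             # Si no estamos dentro de un literal y encontramos un punto, lo convertimos
--             if not in_quote and ch == '.':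
--                 resultado += "'.'"
--                 i += 1
--             else:
--                 resultado += ch
--                 i += 1
--     return resultado
-- ===== SOURCE B (Python) =====
-- def convertir_puntos_a_literal(expresion):
--     parts = expresion.split("'")
--     return "'".join(
--         part.replace('.', "'.'") if i % 2 == 0 else part
--         for i, part in enumerate(parts)
--     )
-- ===== Notes on version B (the rewrite author's own statement) =====
-- stated objective: idiomatic
-- what changed: Replaces the stateful index/while character loop with a split-on-quote, map-even-segments-through-replace, join decomposition.
import Mathlib
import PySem

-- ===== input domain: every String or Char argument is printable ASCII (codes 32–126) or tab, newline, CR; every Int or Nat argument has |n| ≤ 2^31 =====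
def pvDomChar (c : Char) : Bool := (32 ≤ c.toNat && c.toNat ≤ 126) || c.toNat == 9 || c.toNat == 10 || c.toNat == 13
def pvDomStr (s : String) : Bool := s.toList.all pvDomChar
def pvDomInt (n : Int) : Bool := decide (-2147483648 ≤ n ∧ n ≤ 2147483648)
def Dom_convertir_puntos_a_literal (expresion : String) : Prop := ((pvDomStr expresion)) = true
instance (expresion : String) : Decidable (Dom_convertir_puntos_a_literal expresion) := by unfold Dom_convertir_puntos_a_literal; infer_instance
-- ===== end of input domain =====

-- ===== PORT A =====
-- port of A: the while loop over indices becomes structural recursion over the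
-- character list, carrying the same (resultado, in_quote) state
def pvA_go (l : List Char) (resultado : List Char) (in_quote : Bool) : List Char :=
  match l with
  | [] => resultado
  | ch :: rest =>
    if ch = '\'' then pvA_go rest (resultado ++ ['\'']) (!in_quote)
    else if !in_quote && ch = '.' then pvA_go rest (resultado ++ "'.'".toList) in_quote
    else pvA_go rest (resultado ++ [ch]) in_quote

def convertir_puntos_a_literal (expresion : String) : String :=
  String.ofList (pvA_go expresion.toList [] false)

-- ===== PORT B =====
def convertir_puntos_a_literal_alt (expresion : String) : String :=
  String.ofList (PySem.Chars.join "'".toList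
    ((PySem.List.enumerate (PySem.Chars.splitOn expresion.toList "'".toList)).map (fun ip =>
      if ip.1 % 2 == 0 then PySem.Chars.replace ip.2 ".".toList "'.'".toList else ip.2)))

-- ===== PRECONDITION & SPEC =====
def Spec_convertir_puntos_a_literal (expresion : String) (out : String) : Prop := out = convertir_puntos_a_literal_alt expresion
instance (expresion : String) (out : String) : Decidable (Spec_convertir_puntos_a_literal expresion out) := by unfold Spec_convertir_puntos_a_literal; infer_instance

-- ===== CLAIM (what is proved, stated in full; the proofs are below) =====
def Claim_equal_convertir_puntos_a_literal : Prop := ∀ (expresion : String), Dom_convertir_puntos_a_literal expresion → Spec_convertir_puntos_a_literal expresion (convertir_puntos_a_literal expresion)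

-- ===== LEMMAS AND PROOFS =====


-- pure recursion computing A's result (accumulator removed)
def pvARec : List Char → Bool → List Char
  | [], _ => []
  | c :: t, q =>
    if c = '\'' then '\'' :: pvARec t (!q)
    else if !q && c = '.' then '\'' :: '.' :: '\'' :: pvARec t q
    else c :: pvARec t q

-- split on quote: (first segment, remaining segments)
def pvSp : List Char → List Char × List (List Char)
  | [] => ([], [])
  | c :: t =>
    let p := pvSp t
    if c = '\'' then ([], p.1 :: p.2) else (c :: p.1, p.2)

-- replace '.' by "'.'"
def pvRepl : List Char → List Char
  | [] => []
  | c :: t => if c = '.' then '\'' :: '.' :: '\'' :: pvRepl t else c :: pvRepl t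

-- join the remaining segments, q = this segment is inside quotes (odd index)
def pvJ : Bool → List (List Char) → List Char
  | _, [] => []
  | q, p :: ps => '\'' :: ((if q then p else pvRepl p) ++ pvJ (!q) ps)

-- whole joined result, b = first segment is at an even index (outside quotes)
def pvJtop : Bool → List (List Char) → List Char
  | _, [] => []
  | b, p :: ps => (if b then pvRepl p else p) ++ pvJ b ps

theorem pvA_go_eq (l : List Char) : ∀ (acc : List Char) (q : Bool),
    pvA_go l acc q = acc ++ pvARec l q := by
  induction l with
  | nil => intro acc q; simp [pvA_go, pvARec]
  | cons c t ih =>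
    intro acc q
    simp only [pvA_go, pvARec]
    split_ifs <;> simp [ih]

theorem pvARec_eq (l : List Char) : ∀ (q : Bool),
    pvARec l q = pvJtop (!q) ((pvSp l).1 :: (pvSp l).2) := by
  induction l with
  | nil => intro q; cases q <;> simp [pvARec, pvSp, pvJtop, pvJ, pvRepl]
  | cons c t ih =>
    intro q
    by_cases hc : c = '\''
    · subst hc
      cases q <;> simp [pvARec, pvSp, pvJtop, pvJ, pvRepl, ih]
    · by_cases hd : c = '.'
      · subst hd
        cases q <;> simp [pvARec, pvSp, pvJtop, pvRepl, hc, ih]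
      · cases q <;> simp [pvARec, pvSp, pvJtop, pvRepl, hc, hd, ih]

theorem pvSplit_go_eq (l : List Char) : ∀ (fuel : Nat) (cur : List Char) (acc : List (List Char)),
    l.length + 1 ≤ fuel →
    PySem.Chars.splitOn.go "'".toList fuel l cur acc
      = acc.reverse ++ ((cur.reverse ++ (pvSp l).1) :: (pvSp l).2) := by
  induction l with
  | nil =>
    intro fuel cur acc hf
    match fuel, hf with
    | fuel + 1, _ => simp [PySem.Chars.splitOn.go, pvSp]
  | cons c t ih =>
    intro fuel cur acc hf
    match fuel, hf with
    | fuel + 1, hf =>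
      have hft : t.length + 1 ≤ fuel := by simp at hf; omega
      by_cases hc : c = '\''
      · have hpre : List.isPrefixOf "'".toList (c :: t) = true := by
          simp [hc, List.isPrefixOf]
        simp only [PySem.Chars.splitOn.go, hpre, if_true]
        have : List.drop ("'".toList).length (c :: t) = t := by simp
        rw [this, ih fuel [] (cur.reverse :: acc) hft]
        simp [pvSp, hc]
      · have hpre : List.isPrefixOf "'".toList (c :: t) = false := by
          simp [List.isPrefixOf]; intro h; exact absurd h.symm hc
        simp only [PySem.Chars.splitOn.go, hpre]
        rw [if_neg (by simp), ih fuel (c :: cur) acc hft]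
        simp [pvSp, hc]

theorem pvSplitOn_eq (l : List Char) :
    PySem.Chars.splitOn l "'".toList = (pvSp l).1 :: (pvSp l).2 := by
  have := pvSplit_go_eq l (l.length + 1) [] [] (le_refl _)
  simpa [PySem.Chars.splitOn] using this

theorem pvReplace_go_eq (l : List Char) : ∀ (fuel : Nat) (acc : List Char),
    l.length ≤ fuel →
    PySem.Chars.replace.go ".".toList "'.'".toList fuel l acc = acc.reverse ++ pvRepl l := by
  induction l with
  | nil =>
    intro fuel acc hf
    cases fuel <;> simp [PySem.Chars.replace.go, pvRepl]
  | cons c t ih =>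
    intro fuel acc hf
    match fuel, hf with
    | fuel + 1, hf =>
      have hft : t.length ≤ fuel := by simp at hf; omega
      by_cases hc : c = '.'
      · have hpre : List.isPrefixOf ".".toList (c :: t) = true := by
          simp [hc, List.isPrefixOf]
        simp only [PySem.Chars.replace.go, hpre, if_true]
        have : List.drop (".".toList).length (c :: t) = t := by simp
        rw [this, ih fuel _ hft]
        simp [pvRepl, hc]
      · have hpre : List.isPrefixOf ".".toList (c :: t) = false := by
          simp [List.isPrefixOf]; intro h; exact absurd h.symm hc
        simp only [PySem.Chars.replace.go, hpre]
        rw [if_neg (by simp), ih fuel _ hft]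
        simp [pvRepl, hc]

theorem pvReplace_eq (l : List Char) :
    PySem.Chars.replace l ".".toList "'.'".toList = pvRepl l := by
  have := pvReplace_go_eq l l.length [] (le_refl _)
  simpa [PySem.Chars.replace] using this

theorem pvReplace_eq_lit (l : List Char) :
    PySem.Chars.replace l ['.'] ['\'', '.', '\''] = pvRepl l := by
  rw [show (['.'] : List Char) = ".".toList from rfl,
      show (['\'', '.', '\''] : List Char) = "'.'".toList from rfl]
  exact pvReplace_eq l

theorem pvMapEnum (f : Int × List Char → List Char) (p : List Char)
    (ps : List (List Char)) (n : Int) :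
    (PySem.List.enumerate (p :: ps) n).map f
      = f (n, p) :: (PySem.List.enumerate ps (n + 1)).map f := by
  simp [PySem.List.enumerate]

theorem pvJoin_enum (ps : List (List Char)) : ∀ (n : Int),
    PySem.Chars.join "'".toList
      ((PySem.List.enumerate ps n).map (fun ip =>
        if ip.1 % 2 == 0 then PySem.Chars.replace ip.2 ".".toList "'.'".toList else ip.2))
      = pvJtop (n % 2 == 0) ps := by
  induction ps with
  | nil => intro n; simp [PySem.List.enumerate, pvJtop, PySem.Chars.join, List.intercalate]
  | cons p ps ih =>
    intro n
    cases ps with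
    | nil =>
      rw [pvMapEnum]
      simp only [PySem.List.enumerate, List.map]
      by_cases h : (n % 2 == 0) = true <;>
        simp [h, PySem.Chars.join, List.intercalate, pvReplace_eq_lit, pvJtop, pvJ]
    | cons p2 ps2 =>
      have hpar : ((n + 1) % 2 == 0) = !(n % 2 == 0) := by
        rcases Int.emod_two_eq_zero_or_one n with h | h <;> simp [Int.add_emod, h]
      have ih' := ih (n + 1)
      rw [pvMapEnum] at ih'
      rw [pvMapEnum, pvMapEnum, PySem.Chars.join_cons_cons, ih', hpar]
      by_cases h : (n % 2 == 0) = true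
      · simp [h, pvJtop, pvJ, pvReplace_eq_lit]
      · have h' : (n % 2 == 0) = false := by simp_all
        simp [h', pvJtop, pvJ]

-- ===== VERDICT (by name: the statement is the Claim_ definition above) =====
theorem convertir_puntos_a_literal_spec : Claim_equal_convertir_puntos_a_literal := by
  intro expresion _
  unfold Spec_convertir_puntos_a_literal convertir_puntos_a_literal convertir_puntos_a_literal_alt
  rw [pvA_go_eq, pvARec_eq, pvSplitOn_eq, pvJoin_enum]
  simp
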